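-- pv_equiv track=rewrite | github.com/andebetT/CODE-Lib | module3/matrix_implementation.py | arry_even_odd
-- ===== SOURCE A (Python) =====
-- def arry_even_odd(array):
--     if len(array)==0:
--         return  []
--     first=[array[0]]
--     for i in array[1:]:
--         if i%2!=first[-1]%2:
--             first.append(i)
--     return  first
-- ===== SOURCE B (Python) =====
-- def arry_even_odd(array):
--     if not array:
--         return []
--     return [array[0]] + [b for a, b in zip(array, array[1:]) if a % 2 != b % 2]
-- ===== Notes on version B (the rewrite author's own statement) =====
-- stated objective: simpler
-- what changed: Replaces A's stateful loop comparing each element with the last element appended to the output by a stateless adjacent-pair formulation: keep the head plus every element whose parity differs from its immediate predecessor in the input (correct because the last kept element always shares its parity run with the predecessor).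
import Mathlib
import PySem

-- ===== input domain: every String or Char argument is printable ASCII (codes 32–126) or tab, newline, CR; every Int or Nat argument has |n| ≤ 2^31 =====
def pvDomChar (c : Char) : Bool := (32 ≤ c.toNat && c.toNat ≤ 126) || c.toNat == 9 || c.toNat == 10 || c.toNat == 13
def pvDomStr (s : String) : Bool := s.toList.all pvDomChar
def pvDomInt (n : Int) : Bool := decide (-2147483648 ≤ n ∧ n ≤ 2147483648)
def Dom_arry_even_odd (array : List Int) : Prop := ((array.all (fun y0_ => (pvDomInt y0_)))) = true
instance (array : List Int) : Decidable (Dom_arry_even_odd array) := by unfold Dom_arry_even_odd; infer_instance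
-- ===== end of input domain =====

-- B replaces A's stateful last-appended comparison by a stateless head + adjacent-pair parity filter (simpler).

-- ===== PORT A =====
-- A: if empty return []; first = [array[0]]; for i in array[1:]: append i if parity differs from first[-1].
def arry_even_odd (array : List Int) : List Int :=
  match array with
  | [] => []
  | x :: rest =>
    rest.foldl
      (fun first i =>
        if PySem.Int.mod i 2 ≠ PySem.Int.mod ((PySem.List.pyGet? first (-1)).getD 0) 2
        then first ++ [i] else first)
      [x]

-- ===== PORT B =====
-- B: [array[0]] + [b for a, b in zip(array, array[1:]) if a % 2 != b % 2]
def arry_even_odd_alt (array : List Int) : List Int :=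
  match array with
  | [] => []
  | x :: xs =>
    x :: (((x :: xs).zip xs).filter
      (fun p => PySem.Int.mod p.1 2 != PySem.Int.mod p.2 2)).map (·.2)

-- ===== PRECONDITION & SPEC =====
def Spec_arry_even_odd (array : List Int) (out : List Int) : Prop := out = arry_even_odd_alt array
instance (array : List Int) (out : List Int) : Decidable (Spec_arry_even_odd array out) := by unfold Spec_arry_even_odd; infer_instance

-- ===== CLAIM (what is proved, stated in full; the proofs are below) =====
def Claim_equal_arry_even_odd : Prop := ∀ (array : List Int), Dom_arry_even_odd array → Spec_arry_even_odd array (arry_even_odd array)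

-- ===== LEMMAS AND PROOFS =====

-- the tail of A's result when the last appended element is l
def pvTail (l : Int) (rest : List Int) : List Int :=
  match rest with
  | [] => []
  | y :: ys =>
    if PySem.Int.mod y 2 == PySem.Int.mod l 2 then pvTail l ys else y :: pvTail y ys

-- A's loop, started from any accumulator ending in l, appends exactly pvTail l rest
theorem pvLoop_eq (rest : List Int) (acc : List Int) (l : Int) :
    rest.foldl
      (fun first i =>
        if PySem.Int.mod i 2 ≠ PySem.Int.mod ((PySem.List.pyGet? first (-1)).getD 0) 2
        then first ++ [i] else first)
      (acc ++ [l]) = (acc ++ [l]) ++ pvTail l rest := by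
  induction rest generalizing acc l with
  | nil => simp [pvTail]
  | cons y ys ih =>
    simp only [List.foldl_cons, PySem.List.pyGet?_neg_one_append_singleton, Option.getD_some,
      pvTail]
    by_cases h : PySem.Int.mod y 2 = PySem.Int.mod l 2
    · rw [if_neg (not_not_intro h), if_pos (beq_iff_eq.mpr h)]
      exact ih acc l
    · rw [if_pos h, if_neg (by simp only [beq_iff_eq]; exact h)]
      simpa using ih (acc ++ [l]) y

-- pvTail depends only on the parity of the last appended element
theorem pvTail_parity_congr (rest : List Int) (l l' : Int)
    (h : PySem.Int.mod l 2 = PySem.Int.mod l' 2) : pvTail l rest = pvTail l' rest := by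
  induction rest generalizing l l' with
  | nil => rfl
  | cons y ys ih =>
    simp only [pvTail, h]
    by_cases hy : PySem.Int.mod y 2 = PySem.Int.mod l' 2
    · rw [if_pos (beq_iff_eq.mpr hy), if_pos (beq_iff_eq.mpr hy)]
      exact ih l l' h
    · rw [if_neg (by simp only [beq_iff_eq]; exact hy),
        if_neg (by simp only [beq_iff_eq]; exact hy)]

-- pvTail equals B's adjacent-pair filter over zip (l :: rest) rest
theorem pvTail_eq_zip (rest : List Int) (l : Int) :
    pvTail l rest = (((l :: rest).zip rest).filter
      (fun p => PySem.Int.mod p.1 2 != PySem.Int.mod p.2 2)).map (·.2) := by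
  induction rest generalizing l with
  | nil => rfl
  | cons y ys ih =>
    simp only [pvTail, List.zip_cons_cons, List.filter_cons]
    by_cases h : PySem.Int.mod y 2 = PySem.Int.mod l 2
    · have hb : (PySem.Int.mod l 2 != PySem.Int.mod y 2) = false :=
        bne_eq_false_iff_eq.mpr h.symm
      rw [if_pos (beq_iff_eq.mpr h), hb]
      simp only [Bool.false_eq_true, if_false]
      rw [pvTail_parity_congr ys l y h.symm, ih y]
    · have hb : (PySem.Int.mod l 2 != PySem.Int.mod y 2) = true :=
        bne_iff_ne.mpr (fun e => h e.symm)
      rw [if_neg (by simp only [beq_iff_eq]; exact h), hb]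
      simp only [if_true, List.map_cons]
      rw [ih y]

-- ===== VERDICT (by name: the statement is the Claim_ definition above) =====
theorem arry_even_odd_spec : Claim_equal_arry_even_odd := by
  intro array _
  unfold Spec_arry_even_odd arry_even_odd
  cases array with
  | nil => rw [arry_even_odd_alt]
  | cons x rest =>
    rw [arry_even_odd_alt]
    have h := pvLoop_eq rest [] x
    simp only [List.nil_append] at h
    exact h.trans (congrArg (x :: ·) (pvTail_eq_zip rest x))
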